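-- pv_equiv track=rewrite | github.com/ascaron180989/ershov_va_public | Поиск слова.py | lond_en_word
-- ===== SOURCE A (Python) =====
-- import string
--
-- def lond_en_word(word_list: list) -> list:
--     en_word_list = []
--     for word in word_list:
--         for letter in word:
--             if letter not in string.ascii_lowercase:
--                 break
--         else:
--             if word not in en_word_list:
--                 en_word_list.append(word)
--     max_value = max(len(word) for word in en_word_list)
--     return [word for word in en_word_list if len(word) == max_value]
-- ===== SOURCE B (Python) =====
-- import string
--
-- def lond_en_word(word_list: list) -> list:
--     best = []
--     best_len = -1
--     for word in word_list:
--         if all(c in string.ascii_lowercase for c in word):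
--             n = len(word)
--             if n > best_len:
--                 best = [word]
--                 best_len = n
--             elif n == best_len and word not in best:
--                 best.append(word)
--     return best
-- ===== Notes on version B (the rewrite author's own statement) =====
-- stated objective: faster
-- what changed: Single online pass keeping the running maximal length and the list of longest valid words, instead of building the full deduplicated list (with a linear membership scan per word), computing max() over it and rescanning it with a filter.
import Mathlib
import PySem

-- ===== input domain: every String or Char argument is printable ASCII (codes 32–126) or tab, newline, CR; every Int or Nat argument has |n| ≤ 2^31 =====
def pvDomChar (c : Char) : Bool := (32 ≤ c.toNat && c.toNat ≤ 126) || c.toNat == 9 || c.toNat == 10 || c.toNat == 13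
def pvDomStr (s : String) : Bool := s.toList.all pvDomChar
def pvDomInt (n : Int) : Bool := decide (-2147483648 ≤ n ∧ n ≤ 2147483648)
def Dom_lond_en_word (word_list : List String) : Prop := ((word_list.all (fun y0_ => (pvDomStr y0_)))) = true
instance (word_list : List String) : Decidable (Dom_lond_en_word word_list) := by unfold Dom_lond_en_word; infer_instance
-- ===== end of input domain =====

-- B replaces A's build-then-max-then-filter three phases by one online pass keeping the running
-- maximal length and the longest valid words; dedup membership is checked only against the current
-- longest bucket instead of the whole deduplicated list (measured faster).


set_option maxRecDepth 100000

-- string.ascii_lowercase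
def pvAsciiLower : List Char := "abcdefghijklmnopqrstuvwxyz".toList

-- ===== PORT A =====
-- the inner 'for letter in word: if letter not in …: break / else:' loop — true iff no break
def pvAllLowerA : List Char → Bool
  | [] => true
  | c :: rest => if pvAsciiLower.contains c then pvAllLowerA rest else false

def lond_en_word (word_list : List String) : List String :=
  let en := word_list.foldl (fun acc word =>
      if pvAllLowerA word.toList then
        if acc.contains word then acc else acc ++ [word]
      else acc) []
  match PySem.List.max? (en.map fun w => PySem.Str.len w) (fun x => x) with
  | none => []   -- Python raises ValueError (max of empty sequence) here; excluded by Pre_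
  | some m => en.filter (fun w => PySem.Str.len w == m)

-- ===== PORT B =====
def lond_en_word_alt (word_list : List String) : List String :=
  (word_list.foldl (fun (st : List String × Int) word =>
      if word.toList.all (fun c => pvAsciiLower.contains c) then
        let n : Int := PySem.Str.len word
        if n > st.2 then ([word], n)
        else if n == st.2 && !(st.1.contains word) then (st.1 ++ [word], st.2)
        else st
      else st) ([], -1)).1

-- ===== PRECONDITION & SPEC =====
-- A raises ValueError (max() of an empty sequence) when no word is all-lowercase; Pre_ requires one.
def Pre_lond_en_word (word_list : List String) : Prop :=
  (word_list.any (fun w => w.toList.all (fun c => pvAsciiLower.contains c))) = true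

instance (word_list : List String) : Decidable (Pre_lond_en_word word_list) := by
  unfold Pre_lond_en_word; infer_instance

def pvWitness_lond_en_word : List String := (["abc", "No!", "de"])

def Spec_lond_en_word (word_list : List String) (out : List String) : Prop := out = lond_en_word_alt word_list
instance (word_list : List String) (out : List String) : Decidable (Spec_lond_en_word word_list out) := by unfold Spec_lond_en_word; infer_instance

-- ===== CLAIM (what is proved, stated in full; the proofs are below) =====
def Claim_equal_lond_en_word : Prop := ∀ (word_list : List String), Dom_lond_en_word word_list → Pre_lond_en_word word_list → Spec_lond_en_word word_list (lond_en_word word_list)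


-- ===== LEMMAS AND PROOFS =====

-- A's char loop computes List.all of the membership test
theorem pvAllLowerA_eq (l : List Char) :
    pvAllLowerA l = l.all (fun c => pvAsciiLower.contains c) := by
  induction l with
  | nil => rfl
  | cons c rest ih =>
    unfold pvAllLowerA
    cases h : pvAsciiLower.contains c
    · have hc : c ∉ pvAsciiLower := by simpa using h
      simp [hc]
    · have hc : c ∈ pvAsciiLower := by simpa using h
      simp [hc, ih]

def pvStepA (acc : List String) (word : String) : List String :=
  if pvAllLowerA word.toList then
    if acc.contains word then acc else acc ++ [word]
  else acc

def pvStepB (st : List String × Int) (word : String) : List String × Int :=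
  if word.toList.all (fun c => pvAsciiLower.contains c) then
    let n : Int := PySem.Str.len word
    if n > st.2 then ([word], n)
    else if n == st.2 && !(st.1.contains word) then (st.1 ++ [word], st.2)
    else st
  else st

-- the loop invariant tying B's state to A's accumulated list
def pvInv (en : List String) (st : List String × Int) : Prop :=
  st.1 = en.filter (fun w => PySem.Str.len w == st.2) ∧
  (∀ w ∈ en, PySem.Str.len w ≤ st.2) ∧
  ((en = [] ∧ st.2 = -1) ∨ ∃ w ∈ en, PySem.Str.len w = st.2)

theorem pvInv_step (en : List String) (st : List String × Int) (word : String)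
    (h : pvInv en st) : pvInv (pvStepA en word) (pvStepB st word) := by
  obtain ⟨h1, h2, h3⟩ := h
  have hlen0 : (0:Int) ≤ PySem.Str.len word := by
    simp [PySem.Str.len_eq]
  have hsub : ∀ w, w ∈ st.1 → w ∈ en ∧ PySem.Str.len w = st.2 := by
    intro w hw
    rw [h1] at hw
    have := List.mem_filter.mp hw
    refine ⟨this.1, ?_⟩
    have := this.2
    simpa only [beq_iff_eq] using this
  unfold pvStepA pvStepB
  rw [pvAllLowerA_eq]
  by_cases hv : word.toList.all (fun c => pvAsciiLower.contains c) = true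
  · rw [if_pos hv, if_pos hv]
    by_cases hgt : PySem.Str.len word > st.2
    · -- strictly longer: A appends (word cannot already be in en), B restarts the bucket
      have hni : en.contains word = false := by
        rw [Bool.eq_false_iff]
        intro hc
        exact absurd (h2 word (by simpa using hc)) (not_le.mpr hgt)
      rw [if_pos hgt]
      simp only [hni, Bool.false_eq_true, if_false]
      refine ⟨?_, ?_, Or.inr ⟨word, List.mem_append_right _ (by simp), rfl⟩⟩
      · rw [List.filter_append]
        have hnil : en.filter (fun w => PySem.Str.len w == PySem.Str.len word) = [] := by
          apply List.filter_eq_nil_iff.mpr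
          intro w hw
          have hle := h2 w hw
          simp only [beq_iff_eq]
          intro habs
          rw [habs] at hle
          exact absurd hle (not_le.mpr hgt)
        rw [hnil]
        simp only [List.filter_cons, List.filter_nil]
        rw [if_pos (beq_self_eq_true _)]
        simp
      · intro w hw
        rcases List.mem_append.mp hw with hmem | hmem
        · exact le_of_lt (lt_of_le_of_lt (h2 w hmem) hgt)
        · simp at hmem; subst hmem; exact le_refl _
    · rw [if_neg hgt]
      by_cases heq : PySem.Str.len word = st.2
      · by_cases hmem : word ∈ en
        · -- duplicate of a longest word: both sides unchanged
          have hw1 : st.1.contains word = true := by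
            simp only [List.contains_iff_mem, h1, List.mem_filter]
            exact ⟨hmem, by simp only [beq_iff_eq]; exact heq⟩
          have hcond : ((PySem.Str.len word == st.2) && !(st.1.contains word)) = false := by
            rw [hw1]; simp
          rw [hcond]
          simp only [Bool.false_eq_true, if_false]
          have hA : en.contains word = true := by simpa using hmem
          simp only [hA, if_true]
          exact ⟨h1, h2, h3⟩
        · -- new longest word of the same length: both append
          have hw1 : st.1.contains word = false := by
            rw [Bool.eq_false_iff]
            intro hc
            exact hmem (hsub word (by simpa using hc)).1
          have hcond : ((PySem.Str.len word == st.2) && !(st.1.contains word)) = true := by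
            rw [hw1]
            simp only [Bool.not_false, Bool.and_true, beq_iff_eq]
            exact heq
          rw [hcond]
          simp only [if_true]
          have hA : en.contains word = false := by
            rw [Bool.eq_false_iff]; intro hc; exact hmem (by simpa using hc)
          simp only [hA, Bool.false_eq_true, if_false]
          refine ⟨?_, ?_, Or.inr ⟨word, List.mem_append_right _ (by simp), heq⟩⟩
          · rw [List.filter_append, h1]
            have : [word].filter (fun w => PySem.Str.len w == st.2) = [word] := by
              simp only [List.filter_cons, List.filter_nil]
              rw [if_pos (by simp only [beq_iff_eq]; exact heq)]
            rw [this]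
          · intro w hw
            rcases List.mem_append.mp hw with hmem' | hmem'
            · exact h2 w hmem'
            · simp at hmem'; subst hmem'; exact le_of_eq heq
      · -- strictly shorter: B unchanged; A may append but the filter is unaffected
        have hlt : PySem.Str.len word < st.2 := lt_of_le_of_ne (not_lt.mp hgt) heq
        have hcond : ((PySem.Str.len word == st.2) && !(st.1.contains word)) = false := by
          have : (PySem.Str.len word == st.2) = false := by
            simp only [beq_eq_false_iff_ne, ne_eq]
            exact heq
          rw [this]; simp
        rw [hcond]
        simp only [Bool.false_eq_true, if_false]
        have hpos : (0:Int) ≤ st.2 := le_trans hlen0 (le_of_lt hlt)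
        have h3' : ∃ w ∈ en, PySem.Str.len w = st.2 := by
          rcases h3 with ⟨_, hsn⟩ | h3'
          · rw [hsn] at hpos; omega
          · exact h3'
        by_cases hA : en.contains word = true
        · simp only [hA, if_true]
          exact ⟨h1, h2, Or.inr h3'⟩
        · rw [if_neg hA]
          obtain ⟨w0, hw0, hl0⟩ := h3'
          refine ⟨?_, ?_, Or.inr ⟨w0, List.mem_append_left _ hw0, hl0⟩⟩
          · rw [List.filter_append, h1]
            have : [word].filter (fun w => PySem.Str.len w == st.2) = [] := by
              simp only [List.filter_cons, List.filter_nil]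
              rw [if_neg (by simp only [beq_iff_eq]; exact heq)]
            rw [this]
            simp
          · intro w hw
            rcases List.mem_append.mp hw with hmem' | hmem'
            · exact h2 w hmem'
            · simp at hmem'; subst hmem'; exact le_of_lt hlt
  · rw [if_neg hv, if_neg hv]
    exact ⟨h1, h2, h3⟩

theorem pvInv_fold (ws : List String) (en : List String) (st : List String × Int)
    (h : pvInv en st) : pvInv (ws.foldl pvStepA en) (ws.foldl pvStepB st) := by
  induction ws generalizing en st with
  | nil => exact h
  | cons w rest ih => exact ih _ _ (pvInv_step en st w h)

theorem pvStepA_shape (en : List String) (w : String) :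
    pvStepA en w = en ∨ pvStepA en w = en ++ [w] := by
  unfold pvStepA
  split
  · split
    · exact Or.inl rfl
    · exact Or.inr rfl
  · exact Or.inl rfl

theorem pvFoldA_prefix (ws : List String) (en : List String) :
    ∃ t, ws.foldl pvStepA en = en ++ t := by
  induction ws generalizing en with
  | nil => exact ⟨[], by simp⟩
  | cons w rest ih =>
    rcases ih (pvStepA en w) with ⟨t, ht⟩
    rcases pvStepA_shape en w with h | h
    · rw [h] at ht; exact ⟨t, by rw [List.foldl_cons, h]; exact ht⟩
    · rw [h] at ht; exact ⟨w :: t, by rw [List.foldl_cons, h, ht]; simp⟩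

theorem pvFoldA_ne_nil (ws : List String) (en : List String)
    (h : ∃ w ∈ ws, w.toList.all (fun c => pvAsciiLower.contains c) = true) :
    ws.foldl pvStepA en ≠ [] := by
  induction ws generalizing en with
  | nil => simp at h
  | cons w rest ih =>
    rcases h with ⟨v, hv, hvl⟩
    simp only [List.mem_cons] at hv
    rcases hv with rfl | hv
    · have hval : pvAllLowerA v.toList = true := by rw [pvAllLowerA_eq]; exact hvl
      have hne : pvStepA en v ≠ [] := by
        unfold pvStepA; rw [hval]; simp only [if_true]
        split
        · rename_i hc
          intro he; rw [he] at hc; simp at hc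
        · simp
      rcases pvFoldA_prefix rest (pvStepA en v) with ⟨t, ht⟩
      rw [List.foldl_cons, ht]
      intro habs
      exact hne ((List.append_eq_nil_iff.mp habs).1)
    · exact ih (pvStepA en w) ⟨v, hv, hvl⟩

theorem lond_en_word_spec : Claim_equal_lond_en_word := by
  intro word_list _ hpre
  unfold Spec_lond_en_word
  have hA : lond_en_word word_list =
      (match PySem.List.max? ((word_list.foldl pvStepA []).map fun w => PySem.Str.len w) (fun x => x) with
       | none => ([] : List String)
       | some m => (word_list.foldl pvStepA []).filter (fun w => PySem.Str.len w == m)) := rfl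
  have hB : lond_en_word_alt word_list = (word_list.foldl pvStepB ([], -1)).1 := rfl
  rw [hA, hB]
  obtain ⟨h1, h2, h3⟩ := pvInv_fold word_list [] ([], -1) ⟨by simp, by simp, Or.inl ⟨rfl, rfl⟩⟩
  have hne : word_list.foldl pvStepA [] ≠ [] :=
    pvFoldA_ne_nil word_list [] (by
      unfold Pre_lond_en_word at hpre
      rw [List.any_eq_true] at hpre
      exact hpre)
  rcases h3 with ⟨hnil, _⟩ | ⟨w0, hw0, hlen0⟩
  · exact absurd hnil hne
  · obtain ⟨m, hm⟩ : ∃ m, PySem.List.max? ((word_list.foldl pvStepA []).map fun w => PySem.Str.len w) (fun x => x) = some m := by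
      cases hcase : PySem.List.max? ((word_list.foldl pvStepA []).map fun w => PySem.Str.len w) (fun x => x) with
      | none =>
        have := (PySem.List.max?_eq_none_iff _ _).mp hcase
        simp only [List.map_eq_nil_iff] at this
        exact absurd this hne
      | some m => exact ⟨m, rfl⟩
    have hmem := PySem.List.max?_mem hm
    have hmaxx := PySem.List.max?_isMax hm
    have hm2 : m = (word_list.foldl pvStepB ([], -1)).2 := by
      obtain ⟨w', hw', hw'e⟩ := List.mem_map.mp hmem
      have hb1 := h2 w' hw'
      have hb2 := hmaxx (PySem.Str.len w0) (List.mem_map_of_mem hw0)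
      simp only at hb2
      exact le_antisymm (hw'e ▸ hb1) (hlen0 ▸ hb2)
    rw [hm]
    simp only
    rw [hm2]
    exact h1.symm
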